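-- pv_equiv track=rewrite | github.com/wanglalalalala/CS5260 | frontend/app.py | _escape_dollars_for_label
-- ===== SOURCE A (Python) =====
-- def _escape_dollars_for_label(text: str) -> str:
--     """Escape unescaped `$` in a short label so Streamlit's Markdown
--     renderer doesn't interpret it as a LaTeX math delimiter."""
--     out = []
--     for i, ch in enumerate(text):
--         if ch == "$" and (i == 0 or text[i - 1] != "\\"):
--             out.append("\\$")
--         else:
--             out.append(ch)
--     return "".join(out)
-- ===== SOURCE B (Python) =====
-- def _escape_dollars_for_label(text: str) -> str:
--     """Escape unescaped `$` by splitting on already-escaped `\\$` sequences,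
--     escaping every `$` inside each segment, and rejoining with `\\$`."""
--     return '\\$'.join(seg.replace('$', '\\$') for seg in text.split('\\$'))
-- ===== Notes on version B (the rewrite author's own statement) =====
-- stated objective: idiomatic
-- what changed: Replaced the explicit indexed per-character scan that inspects the previous character with a split on already-escaped backslash-dollar occurrences, a plain str.replace of each dollar inside every segment, and a rejoin with the escaped separator.
import Mathlib
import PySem

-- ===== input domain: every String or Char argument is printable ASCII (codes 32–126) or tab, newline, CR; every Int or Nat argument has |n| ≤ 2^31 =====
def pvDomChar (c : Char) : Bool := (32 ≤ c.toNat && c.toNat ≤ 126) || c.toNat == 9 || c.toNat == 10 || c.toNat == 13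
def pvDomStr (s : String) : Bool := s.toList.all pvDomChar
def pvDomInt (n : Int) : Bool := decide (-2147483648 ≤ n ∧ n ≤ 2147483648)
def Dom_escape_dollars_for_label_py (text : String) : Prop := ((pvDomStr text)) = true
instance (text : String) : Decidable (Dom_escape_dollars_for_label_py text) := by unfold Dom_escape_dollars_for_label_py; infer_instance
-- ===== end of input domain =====

-- B escapes unescaped `$` by splitting on already-escaped `\$`, escaping `$` inside each
-- segment, and rejoining with `\$` (idiomatic split/replace/join instead of A's indexed scan).

-- ===== PORT A =====
-- loop body of A: out.append("\\$") when ch == "$" and (i == 0 or text[i-1] != "\\"), else out.append(ch)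
-- (for i ≥ 1 the index i-1 is always in range, so the total pyGetD is exact here)
def stepA (full : List Char) (out : List (List Char)) (p : Int × Char) : List (List Char) :=
  if p.2 = '$' ∧ (p.1 = 0 ∨ PySem.List.pyGetD full (p.1 - 1) ' ' ≠ '\\')
  then out ++ [['\\', '$']] else out ++ [[p.2]]

def escape_dollars_for_label_py (text : String) : String :=
  String.ofList (PySem.Chars.join []
    ((PySem.List.enumerate text.toList 0).foldl (stepA text.toList) []))

-- ===== PORT B =====
-- text.split('\$') with a non-empty separator is exactly PySem.Chars.splitOn on the char list
def escape_dollars_for_label_py_alt (text : String) : String :=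
  PySem.Str.join "\\$"
    ((PySem.Chars.splitOn text.toList "\\$".toList).map
      (fun seg => PySem.Str.replace (String.ofList seg) "$" "\\$"))

-- ===== PRECONDITION & SPEC =====
def Spec_escape_dollars_for_label_py (text : String) (out : String) : Prop := out = escape_dollars_for_label_py_alt text
instance (text : String) (out : String) : Decidable (Spec_escape_dollars_for_label_py text out) := by unfold Spec_escape_dollars_for_label_py; infer_instance

-- ===== CLAIM (what is proved, stated in full; the proofs are below) =====
def Claim_equal_escape_dollars_for_label_py : Prop := ∀ (text : String), Dom_escape_dollars_for_label_py text → Spec_escape_dollars_for_label_py text (escape_dollars_for_label_py text)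

-- ===== LEMMAS AND PROOFS =====

-- pieces A's loop emits, parametrised by "escaping allowed" (prev char is absent or not '\')
def fAp (escOK : Bool) : List Char → List (List Char)
  | [] => []
  | c :: r => (if c == '$' && escOK then ['\\', '$'] else [c]) :: fAp (!(c == '\\')) r

-- recursive model of text.split('\$')
def splitDS : List Char → List (List Char)
  | [] => [[]]
  | '\\' :: '$' :: rest => [] :: splitDS rest
  | c :: rest =>
    match splitDS rest with
    | [] => [[c]]
    | p :: ps => (c :: p) :: ps

-- recursive model of seg.replace('$', '\$')
def repD : List Char → List Char
  | [] => []
  | '$' :: rest => '\\' :: '$' :: repD rest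
  | c :: rest => c :: repD rest

theorem repD_cons_ne (c : Char) (rest : List Char) (h : c ≠ '$') :
    repD (c :: rest) = c :: repD rest := by
  rw [repD.eq_def]
  split
  · simp_all
  · rename_i heq; cases heq; exact absurd rfl h
  · rename_i heq; cases heq; rfl

theorem splitDS_cons_ne (c : Char) (rest : List Char)
    (h : ∀ r, ¬(c = '\\' ∧ rest = '$' :: r)) :
    splitDS (c :: rest)
      = match splitDS rest with | [] => [[c]] | p :: ps => (c :: p) :: ps := by
  rw [splitDS.eq_def]
  split
  · rename_i heq; cases heq
  · rename_i heq
    injection heq with h1 h2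
    exact absurd ⟨h1, h2⟩ (h _)
  · rename_i heq; cases heq; rfl

theorem splitDS_ne_nil (cs : List Char) : splitDS cs ≠ [] := by
  induction cs using splitDS.induct with
  | case1 => simp [splitDS]
  | case2 rest ih => simp [splitDS]
  | case3 c rest h1 hnil ih => exact absurd hnil ih
  | case4 c rest h1 p ps hps ih =>
    rw [splitDS_cons_ne c rest (by rintro r ⟨rfl, rfl⟩; exact h1 r rfl rfl), hps]
    simp

theorem replace_go_eq (fuel : Nat) : ∀ (l acc : List Char), l.length ≤ fuel →
    PySem.Chars.replace.go ['$'] ['\\', '$'] fuel l acc = acc.reverse ++ repD l := by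
  induction fuel with
  | zero =>
    intro l acc h
    have : l = [] := by cases l <;> simp_all
    subst this; rw [PySem.Chars.replace.go]; simp [repD]
  | succ f ih =>
    intro l acc h
    cases l with
    | nil => rw [PySem.Chars.replace.go] <;> simp [repD]
    | cons c t =>
      rw [PySem.Chars.replace.go]
      by_cases hc : c = '$'
      · subst hc
        have hp : (['$'].isPrefixOf ('$' :: t)) = true := by simp [List.isPrefixOf]
        rw [hp]
        simp only [if_true]
        rw [show List.drop (['$'].length) ('$' :: t) = t from rfl,
          ih t _ (by simp at h ⊢; omega)]
        simp [repD]
      · have hp : (['$'].isPrefixOf (c :: t)) = false := by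
          simp [List.isPrefixOf]; exact fun h' => absurd h'.symm hc
        rw [hp]
        simp only [Bool.false_eq_true, if_false]
        rw [ih t _ (by simp at h ⊢; omega), repD_cons_ne c t hc]
        simp

theorem splitOn_go_eq (fuel : Nat) : ∀ (l cur : List Char) (acc : List (List Char)),
    l.length ≤ fuel →
    PySem.Chars.splitOn.go ['\\', '$'] fuel l cur acc
      = acc.reverse ++ (splitDS l).modifyHead (cur.reverse ++ ·) := by
  induction fuel using Nat.strong_induction_on with
  | _ fuel ih =>
    intro l cur acc h
    match fuel, l with
    | 0, [] => rw [PySem.Chars.splitOn.go]; simp [splitDS]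
    | 0, c :: t => simp at h
    | f + 1, [] => rw [PySem.Chars.splitOn.go] <;> simp [splitDS]
    | f + 1, c :: t =>
      rw [PySem.Chars.splitOn.go]
      by_cases hp : (['\\', '$'].isPrefixOf (c :: t)) = true
      · obtain ⟨rfl, r, rfl⟩ : c = '\\' ∧ ∃ r, t = '$' :: r := by
          cases t with
          | nil => simp [List.isPrefixOf] at hp
          | cons c₂ r =>
            simp only [List.isPrefixOf, Bool.and_true, Bool.and_eq_true, beq_iff_eq] at hp
            exact ⟨hp.1.symm, r, by rw [hp.2]⟩
        rw [hp]
        simp only [if_true]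
        rw [show List.drop (['\\', '$'].length) ('\\' :: '$' :: r) = r from rfl,
          ih f (by omega) _ _ _ (by simp at h ⊢; omega)]
        rw [show splitDS ('\\' :: '$' :: r) = [] :: splitDS r from by rw [splitDS]]
        cases hs : splitDS r with
        | nil => exact absurd hs (splitDS_ne_nil r)
        | cons p ps => simp
      · rw [eq_false_of_ne_true hp]
        simp only [Bool.false_eq_true, if_false]
        rw [ih f (by omega) _ _ _ (by simp at h ⊢; omega)]
        have hne : ∀ r, ¬(c = '\\' ∧ t = '$' :: r) := by
          rintro r ⟨rfl, rfl⟩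
          exact hp (by simp [List.isPrefixOf])
        rw [splitDS_cons_ne c t hne]
        cases hs : splitDS t with
        | nil => exact absurd hs (splitDS_ne_nil t)
        | cons p ps => simp

theorem splitOn_eq (cs : List Char) :
    PySem.Chars.splitOn cs ['\\', '$'] = splitDS cs := by
  rw [PySem.Chars.splitOn, splitOn_go_eq (cs.length + 1) cs [] [] (by omega)]
  cases hs : splitDS cs with
  | nil => exact absurd hs (splitDS_ne_nil cs)
  | cons p ps => simp

theorem replace_eq (cs : List Char) :
    PySem.Chars.replace cs ['$'] ['\\', '$'] = repD cs := by
  rw [PySem.Chars.replace]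
  simp only [List.isEmpty_cons, Bool.false_eq_true, if_false]
  exact replace_go_eq cs.length cs [] (le_refl _)

theorem join_cons_append (sep x y : List Char) (ys : List (List Char)) :
    PySem.Chars.join sep ((x ++ y) :: ys) = x ++ PySem.Chars.join sep (y :: ys) := by
  cases ys <;> simp [PySem.Chars.join, List.intercalate]

theorem join_nil_sep_cons (sep : List Char) (xs : List (List Char)) (h : xs ≠ []) :
    PySem.Chars.join sep ([] :: xs) = sep ++ PySem.Chars.join sep xs := by
  cases xs with
  | nil => exact absurd rfl h
  | cons p ps => simp [PySem.Chars.join, List.intercalate]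

theorem join_nil_flatten (xs : List (List Char)) :
    PySem.Chars.join [] xs = xs.flatten := by
  induction xs with
  | nil => simp [PySem.Chars.join, List.intercalate]
  | cons x xs ih =>
    cases xs with
    | nil => simp [PySem.Chars.join, List.intercalate]
    | cons y ys =>
      simp only [PySem.Chars.join, List.intercalate, List.intersperse] at *
      simpa using ih

theorem fAp_false_eq (cs : List Char) (h : ∀ p r, cs = p :: r → p ≠ '$') :
    fAp false cs = fAp true cs := by
  cases cs with
  | nil => rfl
  | cons c r =>
    have hcb : (c == '$') = false := by simp; exact h c r rfl
    simp [fAp, hcb]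

theorem mainB (cs : List Char) :
    PySem.Chars.join ['\\', '$'] ((splitDS cs).map repD) = (fAp true cs).flatten := by
  induction cs using splitDS.induct with
  | case1 => simp [splitDS, repD, fAp, PySem.Chars.join, List.intercalate]
  | case2 rest ih =>
    rw [show splitDS ('\\' :: '$' :: rest) = [] :: splitDS rest from by rw [splitDS]]
    simp only [List.map_cons]
    rw [show repD [] = [] from rfl,
      join_nil_sep_cons _ _ (by simp [splitDS_ne_nil rest]), ih]
    simp [fAp]
  | case3 c rest h1 hnil ih => exact absurd hnil (splitDS_ne_nil rest)
  | case4 c rest h1 p ps hps ih =>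
    have hne : ∀ r, ¬(c = '\\' ∧ rest = '$' :: r) := by
      rintro r ⟨rfl, rfl⟩; exact h1 r rfl rfl
    rw [splitDS_cons_ne c rest hne, hps]
    rw [hps] at ih
    have hrep : repD (c :: p) = (if c == '$' then ['\\', '$'] else [c]) ++ repD p := by
      by_cases hc : c = '$'
      · subst hc; simp [repD]
      · rw [repD_cons_ne c p hc, if_neg (by simpa using hc)]
        rfl
    simp only [List.map_cons, hrep]
    rw [join_cons_append]
    have hj : PySem.Chars.join ['\\', '$'] (repD p :: List.map repD ps)
        = (fAp true rest).flatten := by simpa using ih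
    rw [hj]
    by_cases hc : c = '\\'
    · subst hc
      have hrest : fAp false rest = fAp true rest := by
        apply fAp_false_eq
        rintro p' r' rfl rfl
        exact hne r' ⟨rfl, rfl⟩
      simp [fAp, hrest]
    · have hcb : (c == '\\') = false := by simpa using hc
      simp [fAp, hcb]

-- ----- A side -----

def escOKAt (full : List Char) (n : Nat) : Bool := n == 0 || !(full.getD (n - 1) ' ' == '\\')

theorem foldA (full : List Char) : ∀ (cs : List Char) (n : Nat) (acc : List (List Char)),
    full.drop n = cs →
    (PySem.List.enumerate cs (n : Int)).foldl (stepA full) acc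
      = acc ++ fAp (escOKAt full n) cs := by
  intro cs
  induction cs with
  | nil => intro n acc h; simp [PySem.List.enumerate, fAp]
  | cons c r ih =>
    intro n acc h
    have hget : full.getD n ' ' = c := by
      have h0 : (full.drop n)[0]? = some c := by rw [h]; rfl
      rw [List.getElem?_drop] at h0
      simp only [Nat.add_zero] at h0
      simp [List.getD, h0]
    have hr : full.drop (n + 1) = r := by
      have := congrArg List.tail h
      simpa [List.tail_drop] using this
    rw [PySem.List.enumerate_cons, List.foldl_cons]
    have harg : (n : Int) + 1 = ((n + 1 : Nat) : Int) := by push_cast; ring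
    rw [harg, ih (n + 1) _ hr]
    have hstep : stepA full acc ((n : Int), c)
        = acc ++ [if c == '$' && escOKAt full n then ['\\', '$'] else [c]] := by
      unfold stepA escOKAt
      cases n with
      | zero =>
        by_cases hc : c = '$' <;> simp [hc]
      | succ m =>
        have h1 : ¬((((m + 1 : Nat) : Int)) = 0) := by omega
        have h2 : (((m + 1 : Nat) : Int)) - 1 = ((m : Nat) : Int) := by push_cast; ring
        rw [h2]
        simp only [PySem.List.pyGetD_natCast, h1, false_or]
        by_cases hc : c = '$'
        · subst hc
          by_cases hb : full.getD m ' ' = '\\' <;>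
            simp only [List.getD] at hb <;> simp [hb]
        · simp [hc, show (c == '$') = false from by simpa using hc]
    rw [hstep]
    have hesc : escOKAt full (n + 1) = !(c == '\\') := by
      unfold escOKAt
      simp only [List.getD] at hget
      simp [hget]
    rw [hesc]
    simp [fAp]

theorem A_eq (text : String) :
    escape_dollars_for_label_py text = String.ofList ((fAp true text.toList).flatten) := by
  unfold escape_dollars_for_label_py
  rw [show (0 : Int) = ((0 : Nat) : Int) from rfl, foldA text.toList text.toList 0 [] rfl]
  simp [escOKAt, join_nil_flatten]

theorem B_eq (text : String) :
    escape_dollars_for_label_py_alt text = String.ofList ((fAp true text.toList).flatten) := by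
  unfold escape_dollars_for_label_py_alt
  rw [show ("\\$").toList = ['\\', '$'] from rfl, splitOn_eq]
  rw [PySem.Str.join]
  congr 1
  have hmap : (List.map String.toList
      (List.map (fun seg => PySem.Str.replace (String.ofList seg) "$" "\\$")
        (splitDS text.toList))) = List.map repD (splitDS text.toList) := by
    rw [List.map_map]
    apply List.map_congr_left
    intro seg _
    simp only [Function.comp, PySem.Str.replace]
    rw [show ("$").toList = ['$'] from rfl, show ("\\$").toList = ['\\', '$'] from rfl]
    simp [replace_eq]
  rw [hmap, show ("\\$").toList = ['\\', '$'] from rfl, mainB]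

-- ===== VERDICT (by name: the statement is the Claim_ definition above) =====
theorem escape_dollars_for_label_py_spec : Claim_equal_escape_dollars_for_label_py := by
  intro text _
  unfold Spec_escape_dollars_for_label_py
  rw [A_eq, B_eq]
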